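-- pv_equiv track=rewrite | github.com/xTaeko/AdventOfCode | Day07/DaySevenChallenge.py | calculate_fuel_list
-- ===== SOURCE A (Python) =====
-- def calculate_fuel_list(end_position) -> list:
--     distance = abs(0 - end_position)
--     fuel_list = [0]
--     fuel = 0
--     for index in range(1, distance + 1):
--         fuel += index
--         fuel_list.append(fuel)
--
--     return fuel_list
-- ===== SOURCE B (Python) =====
-- def calculate_fuel_list(end_position) -> list:
--     distance = abs(end_position)
--     return [i * (i + 1) // 2 for i in range(distance + 1)]
-- ===== Notes on version B (the rewrite author's own statement) =====
-- stated objective: simpler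
-- what changed: Replaces the running-accumulator append loop with a stateless closed-form comprehension: each element is the triangular number of its index, computed directly by the closed formula.
import Mathlib
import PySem

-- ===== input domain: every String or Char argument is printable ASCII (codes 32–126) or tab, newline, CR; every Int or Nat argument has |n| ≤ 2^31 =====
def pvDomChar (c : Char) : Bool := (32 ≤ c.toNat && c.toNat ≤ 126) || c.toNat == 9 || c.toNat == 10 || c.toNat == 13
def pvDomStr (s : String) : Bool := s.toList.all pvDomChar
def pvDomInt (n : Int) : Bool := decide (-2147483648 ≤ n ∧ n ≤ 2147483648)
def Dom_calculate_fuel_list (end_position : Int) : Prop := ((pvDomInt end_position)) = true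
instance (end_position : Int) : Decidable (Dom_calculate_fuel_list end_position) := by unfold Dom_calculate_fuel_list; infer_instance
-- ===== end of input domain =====

-- B replaces A's running-accumulator append loop with a stateless closed-form
-- comprehension (each element is i*(i+1)//2); objective: simpler.

-- ===== PORT A =====
-- A: accumulator loop; state = (fuel_list, fuel), folded over range(1, distance+1)
def calculate_fuel_list (end_position : Int) : List Int :=
  let distance := |0 - end_position|
  let s := (PySem.List.pyRange 1 (distance + 1) 1).foldl
    (fun (st : List Int × Int) index => (st.1 ++ [st.2 + index], st.2 + index))
    ([0], 0)
  s.1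

-- ===== PORT B =====
-- B: closed-form comprehension [i*(i+1)//2 for i in range(distance+1)]
def calculate_fuel_list_alt (end_position : Int) : List Int :=
  let distance := |end_position|
  (PySem.List.pyRange 0 (distance + 1) 1).map
    (fun i => PySem.Int.floordiv (i * (i + 1)) 2)

-- ===== PRECONDITION & SPEC =====
def Spec_calculate_fuel_list (end_position : Int) (out : List Int) : Prop := out = calculate_fuel_list_alt end_position
instance (end_position : Int) (out : List Int) : Decidable (Spec_calculate_fuel_list end_position out) := by unfold Spec_calculate_fuel_list; infer_instance

-- ===== CLAIM (what is proved, stated in full; the proofs are below) =====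
def Claim_equal_calculate_fuel_list : Prop := ∀ (end_position : Int), Dom_calculate_fuel_list end_position → Spec_calculate_fuel_list end_position (calculate_fuel_list end_position)

-- ===== LEMMAS AND PROOFS =====

-- the triangular closed form, as B computes it
def pvTri (i : Int) : Int := PySem.Int.floordiv (i * (i + 1)) 2

theorem pvTri_succ (n : Nat) : pvTri ((n : Int) + 1) = pvTri (n : Int) + ((n : Int) + 1) := by
  unfold pvTri
  rw [PySem.Int.floordiv_eq_ediv_of_pos (by omega), PySem.Int.floordiv_eq_ediv_of_pos (by omega)]
  have h : ((n : Int) + 1) * ((n : Int) + 1 + 1) = (n : Int) * ((n : Int) + 1) + ((n : Int) + 1) * 2 := by ring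
  rw [h, Int.add_mul_ediv_right _ _ (by omega)]

-- loop invariant: after folding range(1, n+1), the state is (the closed-form list, pvTri n)
theorem pvLoop_eq (n : Nat) :
    (PySem.List.pyRange 1 ((n : Int) + 1) 1).foldl
      (fun (st : List Int × Int) index => (st.1 ++ [st.2 + index], st.2 + index))
      ([0], 0)
    = ((PySem.List.pyRange 0 ((n : Int) + 1) 1).map pvTri, pvTri (n : Int)) := by
  induction n with
  | zero => decide
  | succ m ih =>
    have h1 : ((m : Int) + 1 + 1) = ((m : Int) + 1) + 1 := by push_cast; ring
    have e1 : PySem.List.pyRange 1 (((m + 1 : Nat) : Int) + 1) 1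
        = PySem.List.pyRange 1 ((m : Int) + 1) 1 ++ [(m : Int) + 1] := by
      push_cast
      rw [h1, PySem.List.pyRange_one_succ_right (by omega)]
    have e2 : PySem.List.pyRange 0 (((m + 1 : Nat) : Int) + 1) 1
        = PySem.List.pyRange 0 ((m : Int) + 1) 1 ++ [(m : Int) + 1] := by
      push_cast
      rw [h1, PySem.List.pyRange_one_succ_right (by omega)]
    rw [e1, e2, List.foldl_append, ih, List.map_append]
    simp [pvTri_succ m]

theorem calculate_fuel_list_eq_alt (end_position : Int) :
    calculate_fuel_list end_position = calculate_fuel_list_alt end_position := by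
  unfold calculate_fuel_list calculate_fuel_list_alt
  have hd : |0 - end_position| = |end_position| := by rw [zero_sub, abs_neg]
  have hnn : 0 ≤ |end_position| := abs_nonneg _
  obtain ⟨n, hn⟩ : ∃ n : Nat, |end_position| = (n : Int) := ⟨|end_position|.toNat, by omega⟩
  simp only [hd, hn]
  rw [pvLoop_eq n]
  rfl

-- ===== VERDICT (by name: the statement is the Claim_ definition above) =====
theorem calculate_fuel_list_spec : Claim_equal_calculate_fuel_list := by
  intro e _
  exact calculate_fuel_list_eq_alt e
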